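-- pv_equiv track=rewrite | github.com/ManoloiuAlexandru/Lessons | vigenere_cipher.py | create_key
-- ===== SOURCE A (Python) =====
-- def create_key(word, key):
--     word_secret = ""
--     poz_of_key = 0
--     for i in range(0, len(word)):
--         if word[i].isalpha():
--             word_secret += key[poz_of_key % len(key)]
--             poz_of_key += 1
--         else:
--             word_secret += word[i]
--     return word_secret
-- ===== SOURCE B (Python) =====
-- def create_key(word, key):
--     remaining = sum(1 for c in word if c.isalpha())
--     out = []
--     for c in reversed(word):
--         if c.isalpha():
--             remaining -= 1
--             out.append(key[remaining % len(key)])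
--         else:
--             out.append(c)
--     return ''.join(reversed(out))
-- ===== Notes on version B (the rewrite author's own statement) =====
-- stated objective: alternative
-- what changed: A makes one forward pass appending while counting key positions up from 0; B first counts the alphabetic characters, then traverses word BACKWARDS, counting the key position DOWN from the total, and builds the output back-to-front, reversing it at the end.
import Mathlib
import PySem

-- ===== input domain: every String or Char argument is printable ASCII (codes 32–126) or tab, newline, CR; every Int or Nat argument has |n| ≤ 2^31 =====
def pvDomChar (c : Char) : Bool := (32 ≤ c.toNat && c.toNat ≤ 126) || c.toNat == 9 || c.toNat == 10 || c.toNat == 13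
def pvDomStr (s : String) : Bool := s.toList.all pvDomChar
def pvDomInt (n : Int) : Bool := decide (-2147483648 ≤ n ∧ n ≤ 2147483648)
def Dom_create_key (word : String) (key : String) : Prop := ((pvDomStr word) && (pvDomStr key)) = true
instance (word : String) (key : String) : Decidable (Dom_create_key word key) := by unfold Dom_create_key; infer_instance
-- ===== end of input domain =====

-- B counts the alphabetic characters once, then traverses word backwards with a countdown
-- key counter, building the output back-to-front (alternative decomposition; not faster).


-- ===== PORT A =====
-- for i in range(0, len(word)): the loop reads exactly the characters of word in order,
-- so it is folded over word.toList; state = (word_secret, poz_of_key).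
-- key[poz % len(key)]: Pre_ guarantees key ≠ "" whenever this branch runs, so getD's
-- default ' ' is never the Python value on admitted inputs (Python raises ZeroDivisionError there).
def ckStepA (kl : List Char) (st : List Char × Nat) (c : Char) : List Char × Nat :=
  if PySem.Chars.isalpha c then
    (st.1 ++ [kl.getD (st.2 % kl.length) ' '], st.2 + 1)
  else
    (st.1 ++ [c], st.2)

def create_key (word : String) (key : String) : String :=
  String.mk (word.toList.foldl (ckStepA key.toList) ([], 0)).1

-- ===== PORT B =====
-- state = (remaining, out); 'remaining -= 1' then key[remaining % len(key)] (Python % on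
-- int: PySem.Int.mod; index is ≥ 0 here, so getD at its toNat is exact on Pre_).
def ckStepB (kl : List Char) (st : Int × List Char) (c : Char) : Int × List Char :=
  if PySem.Chars.isalpha c then
    (st.1 - 1, st.2 ++ [kl.getD (PySem.Int.mod (st.1 - 1) kl.length).toNat ' '])
  else
    (st.1, st.2 ++ [c])

def create_key_alt (word : String) (key : String) : String :=
  String.mk ((word.toList.reverse.foldl (ckStepB key.toList)
      (((word.toList.filter (fun c => PySem.Chars.isalpha c)).length : Int), [])).2.reverse)

-- ===== PRECONDITION & SPEC =====
-- Pre_ excludes exactly the inputs where Python A (and B) raises ZeroDivisionError: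
-- an empty key together with at least one alphabetic character in word.
def Pre_create_key (word : String) (key : String) : Prop :=
  (!key.toList.isEmpty || word.toList.all (fun c => !PySem.Chars.isalpha c)) = true
instance (word : String) (key : String) : Decidable (Pre_create_key word key) := by
  unfold Pre_create_key; infer_instance
def pvWitness_create_key : String × String := ("ab c!", "key")

def Spec_create_key (word : String) (key : String) (out : String) : Prop := out = create_key_alt word key
instance (word : String) (key : String) (out : String) : Decidable (Spec_create_key word key out) := by unfold Spec_create_key; infer_instance

-- ===== CLAIM (what is proved, stated in full; the proofs are below) =====
def Claim_equal_create_key : Prop := ∀ (word : String) (key : String), Dom_create_key word key → Pre_create_key word key → Spec_create_key word key (create_key word key)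

-- ===== LEMMAS AND PROOFS =====

-- the common value: cyclic key character at each alphabetic slot, counter j
def ckAux (kl : List Char) : Nat → List Char → List Char
  | _, [] => []
  | j, c :: cs =>
    if PySem.Chars.isalpha c then kl.getD (j % kl.length) ' ' :: ckAux kl (j + 1) cs
    else c :: ckAux kl j cs

lemma foldlA_eq (kl : List Char) :
    ∀ (cs acc : List Char) (j : Nat),
      (cs.foldl (ckStepA kl) (acc, j)).1 = acc ++ ckAux kl j cs := by
  intro cs
  induction cs with
  | nil => intro acc j; simp [ckAux]
  | cons c cs ih =>
    intro acc j
    by_cases h : PySem.Chars.isalpha c = true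
    · simp [ckAux, ckStepA, h, ih]
    · simp [ckAux, ckStepA, h, ih]

-- the backwards countdown fold produces ckAux reversed
lemma foldlB_eq (kl : List Char) :
    ∀ (cs acc : List Char) (j : Nat),
      cs.reverse.foldl (ckStepB kl)
          ((j : Int) + ((cs.filter (fun c => PySem.Chars.isalpha c)).length : Int), acc)
        = ((j : Int), acc ++ (ckAux kl j cs).reverse) := by
  intro cs
  induction cs with
  | nil => intro acc j; simp [ckAux]
  | cons c cs ih =>
    intro acc j
    rw [List.reverse_cons, List.foldl_append]
    by_cases h : PySem.Chars.isalpha c = true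
    · have hcnt : (((c :: cs).filter (fun c => PySem.Chars.isalpha c)).length : Int)
          = ((cs.filter (fun c => PySem.Chars.isalpha c)).length : Int) + 1 := by
        simp [h]
      rw [hcnt, show (j : Int) + (((cs.filter (fun c => PySem.Chars.isalpha c)).length : Int) + 1)
            = ((j + 1 : Nat) : Int) + ((cs.filter (fun c => PySem.Chars.isalpha c)).length : Int) by
          push_cast; ring,
        ih acc (j + 1)]
      simp only [List.foldl_cons, List.foldl_nil, ckStepB, h, if_pos]
      have hidx : ((((j + 1 : Nat) : Int)) - 1) = ((j : Nat) : Int) := by push_cast; ring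
      rw [hidx]
      have hm : (((j : Nat) : Int) % ((kl.length : Nat) : Int)).toNat = j % kl.length := by
        omega
      simp [ckAux, h, hm]
    · have hcnt : (((c :: cs).filter (fun c => PySem.Chars.isalpha c)).length : Int)
          = ((cs.filter (fun c => PySem.Chars.isalpha c)).length : Int) := by
        simp [h]
      rw [hcnt, ih acc j]
      simp [ckStepB, h, ckAux]

-- ===== VERDICT (by name: the statement is the Claim_ definition above) =====
theorem create_key_spec : Claim_equal_create_key := by
  intro word key _ _
  unfold Spec_create_key create_key create_key_alt
  rw [foldlA_eq]
  have := foldlB_eq key.toList word.toList [] 0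
  simp only [Nat.cast_zero, zero_add] at this
  rw [this]
  simp
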